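-- pv_equiv track=rewrite | github.com/kshiteejm/net-update-code | utils/rewards.py | get_monitor_total_rewards
-- ===== SOURCE A (Python) =====
-- def get_monitor_total_rewards(rewards, dones):
--     r = None
--     monitor_rewards = []
--     for i in reversed(range(len(rewards))):
--         if dones[i] == 1:
--             if r is not None:
--                 monitor_rewards.append(r)
--             r = 0
--
--         if r is not None:
--             r += rewards[i]
--
--     if r is not None:
--         monitor_rewards.append(r)
--
--     if len(monitor_rewards) == 0:
--         monitor_rewards.append(0)
--
--     return monitor_rewards
-- ===== SOURCE B (Python) =====
-- def get_monitor_total_rewards(rewards, dones):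
--     # Single FORWARD pass: accumulate the running segment sum and, at each done
--     # boundary, prepend the finished segment (output is built back-to-front,
--     # which reproduces A's highest-boundary-first order).
--     out = []
--     s = 0
--     for i in range(len(rewards)):
--         s += rewards[i]
--         if dones[i] == 1:
--             out = [s] + out
--             s = 0
--     return out if out else [0]
-- ===== Notes on version B (the rewrite author's own statement) =====
-- stated objective: simpler
-- what changed: Replaces the reverse scan with an Option-typed accumulator and trailing flushes by a single forward pass that keeps a plain running segment sum and prepends each finished segment at a done boundary (building the output back-to-front).
import Mathlib
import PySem

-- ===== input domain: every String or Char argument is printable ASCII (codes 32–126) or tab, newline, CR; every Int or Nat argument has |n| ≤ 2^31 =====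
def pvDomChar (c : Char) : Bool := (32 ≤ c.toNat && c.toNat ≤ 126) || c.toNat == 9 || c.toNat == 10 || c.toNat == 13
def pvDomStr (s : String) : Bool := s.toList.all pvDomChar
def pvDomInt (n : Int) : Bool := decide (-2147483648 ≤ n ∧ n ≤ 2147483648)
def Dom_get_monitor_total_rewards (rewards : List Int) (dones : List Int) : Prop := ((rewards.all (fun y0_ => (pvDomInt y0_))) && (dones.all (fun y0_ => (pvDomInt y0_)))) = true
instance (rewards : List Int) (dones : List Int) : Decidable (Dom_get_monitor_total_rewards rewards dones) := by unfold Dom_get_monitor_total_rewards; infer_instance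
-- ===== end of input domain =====

-- B replaces A's reverse scan with an Option accumulator by a single forward pass that
-- prepends each finished segment sum at a done boundary (objective: simpler, same cost).


-- xs[i] for a Nat loop index; Pre_ guarantees every access is in range, where this is exact
def pvAt (xs : List Int) (i : Nat) : Int := (PySem.List.pyGet? xs (Int.ofNat i)).getD 0

-- ===== PORT A =====
-- loop body of A's reversed scan, as a named helper
def aStep (rewards dones : List Int) (st : Option Int × List Int) (i : Nat) : Option Int × List Int :=
  let st1 := if pvAt dones i == 1 then
      ((some 0 : Option Int), match st.1 with | some v => st.2 ++ [v] | none => st.2)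
    else st
  match st1.1 with
  | some v => (some (v + pvAt rewards i), st1.2)
  | none => st1

def get_monitor_total_rewards (rewards : List Int) (dones : List Int) : List Int :=
  let st := ((List.range rewards.length).reverse).foldl (aStep rewards dones) (none, [])
  let mon := match st.1 with | some v => st.2 ++ [v] | none => st.2
  if mon.length == 0 then [0] else mon

-- ===== PORT B =====
-- loop body of B's forward scan: add rewards[i] to the running sum, flush at a boundary
def bStep (rewards dones : List Int) (st : List Int × Int) (i : Nat) : List Int × Int :=
  let s := st.2 + pvAt rewards i
  if pvAt dones i == 1 then ([s] ++ st.1, 0) else (st.1, s)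

def get_monitor_total_rewards_alt (rewards : List Int) (dones : List Int) : List Int :=
  let st := (List.range rewards.length).foldl (bStep rewards dones) ([], 0)
  if st.1 = [] then [0] else st.1

-- ===== PRECONDITION & SPEC =====
-- Pre_ excludes exactly the inputs where Python A raises IndexError (dones shorter than rewards)
def Pre_get_monitor_total_rewards (rewards : List Int) (dones : List Int) : Prop :=
  rewards.length ≤ dones.length
instance (rewards : List Int) (dones : List Int) : Decidable (Pre_get_monitor_total_rewards rewards dones) := by unfold Pre_get_monitor_total_rewards; infer_instance
def pvWitness_get_monitor_total_rewards : List Int × List Int := ([1, 2, 3], [0, 1, 0])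

def Spec_get_monitor_total_rewards (rewards : List Int) (dones : List Int) (out : List Int) : Prop := out = get_monitor_total_rewards_alt rewards dones
instance (rewards : List Int) (dones : List Int) (out : List Int) : Decidable (Spec_get_monitor_total_rewards rewards dones out) := by unfold Spec_get_monitor_total_rewards; infer_instance

-- ===== CLAIM (what is proved, stated in full; the proofs are below) =====
def Claim_equal_get_monitor_total_rewards : Prop := ∀ (rewards : List Int) (dones : List Int), Dom_get_monitor_total_rewards rewards dones → Pre_get_monitor_total_rewards rewards dones → Spec_get_monitor_total_rewards rewards dones (get_monitor_total_rewards rewards dones)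

-- ===== LEMMAS AND PROOFS =====

-- last element of a nonempty Int list (0 for [])
def lastOf : List Int → Int
  | [] => 0
  | [x] => x
  | _ :: y :: t => lastOf (y :: t)

lemma lastOf_cons_cons (x y : Int) (t : List Int) : lastOf (x :: y :: t) = lastOf (y :: t) := rfl

lemma dropLast_append_lastOf (o : Int) (rest : List Int) :
    (o :: rest).dropLast ++ [lastOf (o :: rest)] = o :: rest := by
  induction rest generalizing o with
  | nil => rfl
  | cons y t ih => simp [lastOf_cons_cons, List.dropLast, ih y]

-- how A's final state reads off B's loop state (out, s), given A's incoming state (r, mon)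
def combine (r : Option Int) (mon : List Int) (bst : List Int × Int) : Option Int × List Int :=
  match bst.1, r with
  | [], none => (none, mon)
  | [], some v => (some (v + bst.2), mon)
  | o :: rest, none => (some (lastOf (o :: rest)), mon ++ (o :: rest).dropLast)
  | o :: rest, some v => (some (lastOf (o :: rest)), mon ++ (v + bst.2) :: (o :: rest).dropLast)

lemma inv (rw dn : List Int) (n : Nat) : ∀ (r : Option Int) (mon : List Int),
    ((List.range n).reverse).foldl (aStep rw dn) (r, mon)
      = combine r mon ((List.range n).foldl (bStep rw dn) ([], 0)) := by
  induction n with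
  | zero => intro r mon; cases r <;> simp [combine]
  | succ n ih =>
    intro r mon
    rw [List.range_succ, List.reverse_append, List.foldl_append]
    simp only [List.reverse_singleton, List.foldl_cons, List.foldl_nil]
    rw [ih (aStep rw dn (r, mon) n).1 (aStep rw dn (r, mon) n).2]
    rcases h : (List.range n).foldl (bStep rw dn) ([], 0) with ⟨out, s⟩
    by_cases hd : pvAt dn n = 1 <;>
      cases r <;> rcases out with _ | ⟨o, rest⟩ <;>
        simp [aStep, bStep, combine, hd, h, lastOf] <;> ring

-- ===== VERDICT (by name: the statement is the Claim_ definition above) =====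
theorem get_monitor_total_rewards_spec : Claim_equal_get_monitor_total_rewards := by
  intro rewards dones _ _
  unfold Spec_get_monitor_total_rewards get_monitor_total_rewards get_monitor_total_rewards_alt
  rw [inv rewards dones rewards.length none []]
  rcases h : (List.range rewards.length).foldl (bStep rewards dones) ([], 0) with ⟨out, s⟩
  rcases out with _ | ⟨o, rest⟩
  · simp [combine]
  · simp [combine, dropLast_append_lastOf]
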